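-- pv_equiv track=rewrite | github.com/tdda/tdda-book-examples | c5/wrap.py | find_split_field
-- ===== SOURCE A (Python) =====
-- def find_split_field(line, N=80, sep=','):
--     i = 0
--     p = 0
--     done = False
--     while not done:
--         pos = line.find(sep, p)
--         if pos < N and pos != -1:
--             p = pos + 1
--             i += 1
--         else:
--             done = True
--     if pos == -1 and len(line) < N:
--         return i + 1
--     else:
--         return max(i, 1)  # Always allow 1, even if it blows the limit
-- ===== SOURCE B (Python) =====
-- def find_split_field(line, N=80, sep=','):
--     L, k = len(line), len(sep)
--     hi = min(N, L - k + 1)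
--     count = sum(1 for pos in range(hi) if line[pos:pos+k] == sep)
--     no_more = not any(line[pos:pos+k] == sep for pos in range(max(N, 0), L - k + 1))
--     if no_more and L < N:
--         return count + 1
--     return max(count, 1)
-- ===== Notes on version B (the rewrite author's own statement) =====
-- stated objective: alternative
-- what changed: Replaces A's stateful find-and-jump while-loop by a direct scan of candidate positions: count overlapping separator starts before column N with one range scan, and decide whether any separator starts at or after N with a second scan, reproducing the max(i,1)/+1 endgame exactly.
import Mathlib
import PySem

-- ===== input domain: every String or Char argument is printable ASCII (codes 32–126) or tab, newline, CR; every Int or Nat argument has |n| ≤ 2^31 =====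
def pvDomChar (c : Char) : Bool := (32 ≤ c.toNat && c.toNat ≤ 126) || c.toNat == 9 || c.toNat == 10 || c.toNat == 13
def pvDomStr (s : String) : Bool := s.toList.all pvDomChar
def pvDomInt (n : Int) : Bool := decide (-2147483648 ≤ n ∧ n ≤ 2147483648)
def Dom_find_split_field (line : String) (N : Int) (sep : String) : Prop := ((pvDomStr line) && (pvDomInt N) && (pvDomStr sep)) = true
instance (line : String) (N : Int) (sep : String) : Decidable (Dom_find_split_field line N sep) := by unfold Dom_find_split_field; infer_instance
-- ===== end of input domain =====

-- B replaces A's find-jumping while-loop by a direct scan of candidate positions (count the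
-- separator starts before column N, plus a boundary probe for a separator at/after N):
-- a different decomposition of the same exact value ("alternative"; no speed claim).

-- ===== PORT A =====
-- A's while-loop: state (i, p); each round pos = line.find(sep, p).  The fuel line.length + 2 is a
-- totality guard only: p strictly increases and stays ≤ len+1, so the fuel is never exhausted
-- (lemma fsfLoop_spec below is applied with exactly this fuel).
def fsfLoop (cs ss : List Char) (N : Int) : Nat → Int → Int → Int × Int
  | 0, i, p => (i, PySem.Chars.findFrom cs ss p none)
  | fuel+1, i, p =>
      let pos := PySem.Chars.findFrom cs ss p none
      if pos < N ∧ pos ≠ -1 then fsfLoop cs ss N fuel (i + 1) (pos + 1)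
      else (i, pos)

def find_split_field (line : String) (N : Int) (sep : String) : Int :=
  let r := fsfLoop line.toList sep.toList N (line.toList.length + 2) 0 0
  if r.2 = -1 ∧ (line.toList.length : Int) < N then r.1 + 1 else max r.1 1

-- ===== PORT B =====
-- line[pos:pos+k] == sep
def matchAt (cs ss : List Char) (pos : Int) : Bool :=
  PySem.List.slice cs (some pos) (some (pos + (ss.length : Int))) == ss

def find_split_field_alt (line : String) (N : Int) (sep : String) : Int :=
  let cs := line.toList
  let ss := sep.toList
  let L : Int := cs.length
  let k : Int := ss.length
  let hi := min N (L - k + 1)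
  -- count = sum(1 for pos in range(hi) if line[pos:pos+k] == sep)
  let count : Int :=
    ((PySem.List.pyRange 0 hi 1).map (fun pos => if matchAt cs ss pos then (1 : Int) else 0)).sum
  -- no_more = not any(line[pos:pos+k] == sep for pos in range(max(N,0), L-k+1))
  let noMore := (PySem.List.pyRange (max N 0) (L - k + 1) 1).all (fun pos => !(matchAt cs ss pos))
  if noMore = true ∧ L < N then count + 1 else max count 1

-- ===== PRECONDITION & SPEC =====
def Spec_find_split_field (line : String) (N : Int) (sep : String) (out : Int) : Prop := out = find_split_field_alt line N sep
instance (line : String) (N : Int) (sep : String) (out : Int) : Decidable (Spec_find_split_field line N sep out) := by unfold Spec_find_split_field; infer_instance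

-- ===== CLAIM (what is proved, stated in full; the proofs are below) =====
def Claim_equal_find_split_field : Prop := ∀ (line : String) (N : Int) (sep : String), Dom_find_split_field line N sep → Spec_find_split_field line N sep (find_split_field line N sep)

-- ===== LEMMAS AND PROOFS =====

-- number of separator occurrences at positions j ∈ [p, L] with j < N (what A's i counts from state p)
def fsfCnt (cs ss : List Char) (N : Int) (p : Nat) : Nat :=
  (List.range' p (cs.length + 1 - p)).countP
    (fun j => decide (ss <+: cs.drop j) && decide ((j : Int) < N))

-- an occurrence at/after column N remains at or after position p (A's final pos ≠ -1 from state p)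
def fsfMore (cs ss : List Char) (N : Int) (p : Nat) : Prop :=
  ∃ j : Nat, p ≤ j ∧ j ≤ cs.length ∧ N ≤ (j : Int) ∧ ss <+: cs.drop j

lemma matchAt_eq (cs ss : List Char) (j : Nat) :
    matchAt cs ss (j : Int) = decide (ss <+: cs.drop j) := by
  unfold matchAt
  rw [show (j:Int) + (ss.length:Int) = ((j + ss.length : Nat) : Int) by push_cast; ring,
      PySem.List.slice_natCast]
  simp only [Nat.add_sub_cancel_left, List.prefix_iff_eq_take]
  rw [Bool.eq_iff_iff]
  simp only [beq_iff_eq, decide_eq_true_eq]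
  exact eq_comm

-- CPython's quirk (kept by PySem.Chars.findFrom): find with a start past len(s) returns -1
lemma findFrom_past (cs ss : List Char) :
    PySem.Chars.findFrom cs ss ((cs.length : Int) + 1) none = -1 := by
  simp only [PySem.Chars.findFrom]
  split_ifs <;> omega

lemma infix_iff_exists_drop (sub t : List Char) : sub <:+: t ↔ ∃ j, sub <+: t.drop j := by
  rw [← PySem.Chars.isIn_iff_infix, ← PySem.Chars.exists_prefix_drop_iff_isIn]

lemma findFrom_neg_one_iff (cs ss : List Char) (p : Nat) (hp : p ≤ cs.length) :
    PySem.Chars.findFrom cs ss (p : Int) none = -1 ↔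
      ∀ j : Nat, p ≤ j → j ≤ cs.length → ¬ ss <+: cs.drop j := by
  rw [PySem.Chars.findFrom_natCast_eq_neg_one_iff cs ss p hp, infix_iff_exists_drop]
  simp only [List.drop_drop]
  constructor
  · intro h j hpj hjL hpre
    exact h ⟨j - p, by rwa [show p + (j - p) = j by omega]⟩
  · rintro h ⟨j, hj⟩
    by_cases hjl : p + j ≤ cs.length
    · exact h (p + j) (by omega) hjl hj
    · have he : cs.drop (p + j) = [] := List.drop_eq_nil_of_le (by omega)
      rw [he, List.prefix_nil] at hj
      exact h cs.length hp le_rfl (by simp [hj, List.drop_length])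

lemma findFrom_pos_spec (cs ss : List Char) (p : Nat) (hp : p ≤ cs.length)
    (h : PySem.Chars.findFrom cs ss (p : Int) none ≠ -1) :
    ∃ j0 : Nat, PySem.Chars.findFrom cs ss (p : Int) none = (j0 : Int) ∧
      p ≤ j0 ∧ j0 ≤ cs.length ∧ ss <+: cs.drop j0 ∧
      ∀ i : Nat, p ≤ i → i < j0 → ¬ ss <+: cs.drop i := by
  obtain ⟨h1, h2, h3⟩ := PySem.Chars.findFrom_natCast_spec cs ss p hp h
  have h0 : (0 : Int) ≤ PySem.Chars.findFrom cs ss (p : Int) none :=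
    le_trans (Int.natCast_nonneg p) h1
  have heq : PySem.Chars.findFrom cs ss (p : Int) none
      = ((PySem.Chars.findFrom cs ss (p : Int) none).toNat : Int) :=
    (Int.toNat_of_nonneg h0).symm
  have hple : p ≤ (PySem.Chars.findFrom cs ss (p : Int) none).toNat := by omega
  refine ⟨_, heq, hple, ?_, h2, h3⟩
  by_cases hss : ss = []
  · subst hss
    rw [PySem.Chars.findFrom_natCast cs [] p hp, PySem.Chars.find_nil] at heq ⊢
    simp at heq ⊢
    omega
  · by_contra hgt
    rw [List.drop_eq_nil_of_le (by omega), List.prefix_nil] at h2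
    exact hss h2

lemma fsfCnt_zero (cs ss : List Char) (N : Int) (p : Nat)
    (h : ∀ j : Nat, p ≤ j → j ≤ cs.length → ¬ (ss <+: cs.drop j ∧ (j : Int) < N)) :
    fsfCnt cs ss N p = 0 := by
  unfold fsfCnt
  rw [List.countP_eq_zero]
  intro j hj
  obtain ⟨h1, h2⟩ := List.mem_range'_1.mp hj
  simp only [Bool.and_eq_true, decide_eq_true_eq, not_and]
  intro hpre hN
  exact h j h1 (by omega) ⟨hpre, hN⟩

lemma fsfCnt_split (cs ss : List Char) (N : Int) (p j0 : Nat)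
    (hpj : p ≤ j0) (hjL : j0 ≤ cs.length) (hpre : ss <+: cs.drop j0) (hN : (j0 : Int) < N)
    (hmin : ∀ i : Nat, p ≤ i → i < j0 → ¬ ss <+: cs.drop i) :
    fsfCnt cs ss N p = fsfCnt cs ss N (j0+1) + 1 := by
  unfold fsfCnt
  have hr : List.range' p (cs.length + 1 - p)
      = List.range' p (j0 - p) ++ List.range' j0 ((cs.length + 1 - (j0 + 1)) + 1) := by
    rw [show cs.length + 1 - p = (j0 - p) + ((cs.length + 1 - (j0 + 1)) + 1) by omega,
        ← List.range'_append_1, show p + (j0 - p) = j0 by omega]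
  rw [hr, List.countP_append, List.range'_succ, List.countP_cons]
  simp only [hpre, hN, decide_true, Bool.and_self, if_pos]
  have h0 : (List.range' p (j0 - p)).countP
      (fun j => decide (ss <+: cs.drop j) && decide ((j : Int) < N)) = 0 := by
    rw [List.countP_eq_zero]
    intro j hj
    obtain ⟨h1, h2⟩ := List.mem_range'_1.mp hj
    simp only [Bool.and_eq_true, decide_eq_true_eq, not_and]
    intro hpre2 _
    exact hmin j h1 (by omega) hpre2
  omega

lemma fsfLoop_spec (cs ss : List Char) (N : Int) :
    ∀ (fuel : Nat) (p : Nat) (i : Int), p ≤ cs.length + 1 → cs.length + 2 - p ≤ fuel →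
      (fsfLoop cs ss N fuel i (p : Int)).1 = i + (fsfCnt cs ss N p : Int) ∧
      ((fsfLoop cs ss N fuel i (p : Int)).2 = -1 ↔ ¬ fsfMore cs ss N p) := by
  intro fuel
  induction fuel with
  | zero => intro p i hp hf; omega
  | succ fuel ih =>
    intro p i hp hf
    simp only [fsfLoop]
    by_cases hp1 : p = cs.length + 1
    · subst hp1
      rw [show ((cs.length + 1 : Nat) : Int) = (cs.length : Int) + 1 by push_cast; ring,
          findFrom_past cs ss, if_neg (by simp)]
      constructor
      · have h0 : fsfCnt cs ss N (cs.length + 1) = 0 :=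
          fsfCnt_zero cs ss N _ (by intro j h1 h2 _; omega)
        simp [h0]
      · simp only [true_iff]
        rintro ⟨j, h1, h2, _, _⟩
        omega
    · have hple : p ≤ cs.length := by omega
      by_cases hneg : PySem.Chars.findFrom cs ss (p:Int) none = -1
      · rw [hneg, if_neg (by simp)]
        have hall := (findFrom_neg_one_iff cs ss p hple).mp hneg
        constructor
        · have h0 : fsfCnt cs ss N p = 0 :=
            fsfCnt_zero cs ss N p (fun j h1 h2 hc => hall j h1 h2 hc.1)
          simp [h0]
        · simp only [true_iff]
          rintro ⟨j, h1, h2, _, h4⟩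
          exact hall j h1 h2 h4
      · obtain ⟨j0, he, hpj, hjL, hpre, hmin⟩ := findFrom_pos_spec cs ss p hple hneg
        rw [he]
        by_cases hN : (j0:Int) < N
        · rw [if_pos ⟨hN, by simp⟩,
            show (j0:Int) + 1 = ((j0+1 : Nat) : Int) by push_cast; ring]
          obtain ⟨ih1, ih2⟩ := ih (j0+1) (i+1) (by omega) (by omega)
          constructor
          · rw [ih1, fsfCnt_split cs ss N p j0 hpj hjL hpre hN hmin]
            push_cast
            ring
          · rw [ih2]
            constructor
            · rintro h ⟨j, h1, h2, h3, h4⟩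
              refine h ⟨j, ?_, h2, h3, h4⟩
              rcases Nat.lt_or_ge j (j0+1) with hlt | hge
              · exfalso
                rcases Nat.lt_or_ge j j0 with hlt2 | hge2
                · exact hmin j h1 hlt2 h4
                · have hj : j = j0 := by omega
                  subst hj
                  omega
              · omega
            · rintro h ⟨j, h1, h2, h3, h4⟩
              exact h ⟨j, by omega, h2, h3, h4⟩
        · rw [if_neg (by simp [hN])]
          constructor
          · have h0 : fsfCnt cs ss N p = 0 := by
              refine fsfCnt_zero cs ss N p ?_
              rintro j h1 h2 ⟨hpre2, hN2⟩
              rcases Nat.lt_or_ge j j0 with hlt | hge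
              · exact hmin j h1 hlt hpre2
              · have : (j0:Int) ≤ (j:Int) := by exact_mod_cast hge
                omega
            simp [h0]
          · constructor
            · intro h
              exfalso
              omega
            · intro h
              exact absurd ⟨j0, hpj, hjL, by omega, hpre⟩ h

lemma prefix_drop_le (cs ss : List Char) (j : Nat) (h : ss <+: cs.drop j) :
    ss.length + j ≤ cs.length ∨ ss = [] := by
  by_cases hss : ss = []
  · exact Or.inr hss
  · left
    have h1 := h.length_le
    rw [List.length_drop] at h1
    have h2 : 0 < ss.length := List.length_pos_iff.mpr hss
    by_cases hj : j ≤ cs.length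
    · omega
    · exfalso
      rw [List.drop_eq_nil_of_le (by omega), List.prefix_nil] at h
      exact hss h

lemma count_eq (cs ss : List Char) (N : Int) :
    ((PySem.List.pyRange 0 (min N ((cs.length : Int) - (ss.length : Int) + 1)) 1).map
      (fun pos => if matchAt cs ss pos then (1 : Int) else 0)).sum
      = (fsfCnt cs ss N 0 : Int) := by
  rw [PySem.List.pyRange_one, List.map_map]
  rw [show (fun pos => if matchAt cs ss pos then (1:Int) else 0) ∘ (fun k : Nat => (0:Int) + (k:Int))
      = fun k : Nat => if matchAt cs ss (k:Int) then (1:Int) else 0 by funext k; simp]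
  rw [PySem.List.sum_map_ite_one_zero (fun k : Nat => matchAt cs ss (k:Int))]
  congr 1
  rw [List.range_eq_range']
  unfold fsfCnt
  set hi := min N ((cs.length : Int) - (ss.length : Int) + 1) with hhi
  set h := (hi - 0).toNat with hh
  have hhle : h ≤ cs.length + 1 := by omega
  rw [show cs.length + 1 - 0 = h + (cs.length + 1 - h) by omega,
      ← List.range'_append_1, List.countP_append, Nat.zero_add]
  have h2 : (List.range' h (cs.length + 1 - h)).countP
      (fun j => decide (ss <+: cs.drop j) && decide ((j : Int) < N)) = 0 := by
    rw [List.countP_eq_zero]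
    intro j hj
    obtain ⟨hj1, hj2⟩ := List.mem_range'_1.mp hj
    simp only [Bool.and_eq_true, decide_eq_true_eq, not_and]
    intro hpre hjN
    rcases prefix_drop_le cs ss j hpre with hle | hnil
    · omega
    · subst hnil
      simp only [List.length_nil] at hhi
      omega
  have h1 : (List.range' 0 h).countP
        (fun j => decide (ss <+: cs.drop j) && decide ((j : Int) < N))
      = (List.range' 0 h).countP (fun j : Nat => matchAt cs ss (j:Int)) := by
    apply List.countP_congr
    intro j hj
    obtain ⟨_, hj2⟩ := List.mem_range'_1.mp hj
    rw [matchAt_eq]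
    have hN : ((j:Int) < N) := by omega
    simp [hN]
  rw [h2, h1]
  omega

lemma noMore_eq (cs ss : List Char) (N : Int) :
    ((PySem.List.pyRange (max N 0) ((cs.length : Int) - (ss.length : Int) + 1) 1).all
      (fun pos => !(matchAt cs ss pos)) = true) ↔ ¬ fsfMore cs ss N 0 := by
  rw [PySem.List.pyRange_one, List.all_map, List.all_eq_true]
  constructor
  · intro h hm
    obtain ⟨j, _, hjL, hjN, hpre⟩ := hm
    have hj2 : (j : Int) ≤ (cs.length : Int) - (ss.length : Int) := by
      rcases prefix_drop_le cs ss j hpre with hle | hnil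
      · omega
      · subst hnil; simp; omega
    have hjr : j - (max N 0).toNat < ((cs.length : Int) - (ss.length : Int) + 1 - max N 0).toNat := by
      omega
    have hj3 := h (j - (max N 0).toNat) (List.mem_range.mpr hjr)
    simp only [Function.comp_apply] at hj3
    rw [show max N 0 + ((j - (max N 0).toNat : Nat) : Int) = (j : Int) by omega,
        matchAt_eq] at hj3
    simp only [Bool.not_eq_eq_eq_not, Bool.not_true, decide_eq_false_iff_not] at hj3
    exact hj3 hpre
  · intro h j hj
    have hjr := List.mem_range.mp hj
    simp only [Function.comp_apply]
    rw [show max N 0 + (j : Int) = (((max N 0).toNat + j : Nat) : Int) by push_cast; omega,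
        matchAt_eq]
    simp only [Bool.not_eq_eq_eq_not, Bool.not_true, decide_eq_false_iff_not]
    intro hpre
    exact h ⟨(max N 0).toNat + j, by omega, by omega, by omega, hpre⟩

-- ===== VERDICT (by name: the statement is the Claim_ definition above) =====
theorem find_split_field_spec : Claim_equal_find_split_field := by
  intro line N sep _
  unfold Spec_find_split_field find_split_field find_split_field_alt
  obtain ⟨h1, h2⟩ := fsfLoop_spec line.toList sep.toList N (line.toList.length + 2) 0 0
    (by omega) (by omega)
  have hc := count_eq line.toList sep.toList N
  have hn := noMore_eq line.toList sep.toList N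
  simp only [Nat.cast_zero, String.length_toList] at h1 h2 hc hn
  by_cases hm : fsfMore line.toList sep.toList N 0 <;>
  by_cases hN : ((line.length : Int) < N) <;>
  simp [hc, hn, h1, h2, hm, hN]
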